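-- pv_equiv track=rewrite | github.com/mardex1/Selecao_atributos_Hierarquico | GMNB.py | gera_hierarquia_completa
-- ===== SOURCE A (Python) =====
-- def gera_hierarquia_completa(hierarquia):
--     """Função que usa as classes da base de dados para construir uma hierarquia
--    que contém as classes intermediárias que não aparecem na base de dados."""
--     hierarquia_completa = []
--     for classe in hierarquia:
--         for _ in range(len(classe.split('.'))):
--             if classe not in hierarquia_completa:
--                 hierarquia_completa.append(classe)
--                 classe = classe.split('.')[:-1]
--                 if len(classe) == 1: # Sobrou so o R
--                     break
--                 classe = '.'.join(classe)
--     return hierarquia_completa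
-- ===== SOURCE B (Python) =====
-- def gera_hierarquia_completa(hierarquia):
--     """Two-pass rewrite: materialize every ancestor candidate first (deepest-first,
--     keeping the lone root only for single-component classes), then deduplicate
--     once, order-preserving."""
--     candidatos = []
--     for classe in hierarquia:
--         partes = classe.split('.')
--         if len(partes) == 1:
--             candidatos.append(classe)
--         else:
--             for i in range(len(partes), 1, -1):
--                 candidatos.append('.'.join(partes[:i]))
--     resultado = []
--     vistos = set()
--     for c in candidatos:
--         if c not in vistos:
--             vistos.add(c)
--             resultado.append(c)
--     return resultado
-- ===== Notes on version B (the rewrite author's own statement) =====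
-- stated objective: faster
-- what changed: B splits the work into two passes: it first materializes every ancestor candidate ('.'.join(parts[:i]) deepest-first, the class itself when single-component), then deduplicates once order-preservingly with a seen-set, replacing A's interleaved append-if-absent whose 'classe not in hierarquia_completa' scans the growing result list linearly for every candidate.
import Mathlib
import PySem

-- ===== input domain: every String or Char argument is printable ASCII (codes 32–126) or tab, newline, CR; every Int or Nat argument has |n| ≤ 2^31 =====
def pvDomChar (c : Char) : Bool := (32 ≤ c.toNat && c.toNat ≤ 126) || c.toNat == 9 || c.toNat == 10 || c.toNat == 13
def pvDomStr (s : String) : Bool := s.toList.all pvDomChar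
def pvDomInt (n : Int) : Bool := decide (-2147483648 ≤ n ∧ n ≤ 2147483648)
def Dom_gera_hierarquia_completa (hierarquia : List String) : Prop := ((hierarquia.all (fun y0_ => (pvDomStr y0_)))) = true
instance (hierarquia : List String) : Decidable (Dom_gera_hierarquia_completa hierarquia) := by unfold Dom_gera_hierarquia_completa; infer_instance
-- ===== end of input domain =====

-- B materializes all ancestor candidates in one pass and then deduplicates in a
-- second pass with a seen-set, instead of A's interleaved append-if-absent with
-- a linear membership scan (alternative decomposition).

-- ===== PORT A =====
-- classe.split('.')  (separator "." is non-empty, so split? always returns a value)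
def pvSplitDotA (s : String) : List String := (PySem.Str.split? s ".").getD []

-- the inner 'for _ in range(len(classe.split('.')))' loop of A, fuel = that range length
def pvInnerA : Nat → String → List String → List String
  | 0, _, acc => acc
  | n+1, classe, acc =>
    if classe ∈ acc then pvInnerA n classe acc
    else
      let acc' := acc ++ [classe]
      let partes := (pvSplitDotA classe).dropLast   -- classe.split('.')[:-1]
      if partes.length = 1 then acc'                -- break: 'Sobrou so o R'
      else pvInnerA n (PySem.Str.join "." partes) acc'

def gera_hierarquia_completa (hierarquia : List String) : List String :=
  hierarquia.foldl (fun acc classe => pvInnerA (pvSplitDotA classe).length classe acc) []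

-- ===== PORT B =====
-- candidates contributed by one class: the class itself if single-component,
-- otherwise '.'.join(partes[:i]) for i in range(len(partes), 1, -1)
def pvCandidatosB (classe : String) : List String :=
  let partes := (PySem.Str.split? classe ".").getD []
  if partes.length = 1 then [classe]
  else (PySem.List.pyRange partes.length 1 (-1)).map
        (fun i => PySem.Str.join "." (PySem.List.slice partes none (some i)))

def gera_hierarquia_completa_alt (hierarquia : List String) : List String :=
  let candidatos := hierarquia.foldl (fun acc classe => acc ++ pvCandidatosB classe) []
  (candidatos.foldl
     (fun (st : List String × PySem.Set String) c =>
        if st.2.contains c then st else (st.1 ++ [c], st.2.add c))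
     ([], PySem.Set.ofList [])).1

-- ===== PRECONDITION & SPEC =====
def Spec_gera_hierarquia_completa (hierarquia : List String) (out : List String) : Prop := out = gera_hierarquia_completa_alt hierarquia
instance (hierarquia : List String) (out : List String) : Decidable (Spec_gera_hierarquia_completa hierarquia out) := by unfold Spec_gera_hierarquia_completa; infer_instance

-- ===== CLAIM (what is proved, stated in full; the proofs are below) =====
def Claim_equal_gera_hierarquia_completa : Prop := ∀ (hierarquia : List String), Dom_gera_hierarquia_completa hierarquia → Spec_gera_hierarquia_completa hierarquia (gera_hierarquia_completa hierarquia)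

-- ===== LEMMAS AND PROOFS =====
def pvSplitC : List Char → List (List Char)
  | [] => [[]]
  | c :: rest =>
    if c = '.' then [] :: pvSplitC rest
    else match pvSplitC rest with
         | [] => [[c]]
         | p :: ps => (c :: p) :: ps

lemma pvSplitC_ne_nil (l : List Char) : pvSplitC l ≠ [] := by
  cases l with
  | nil => simp [pvSplitC]
  | cons c rest =>
    simp only [pvSplitC]
    split
    · simp
    · split <;> simp

lemma pvGo_eq (fuel : Nat) : ∀ (l cur : List Char) (accs : List (List Char)) (p : List Char) (ps : List (List Char)),
    l.length < fuel → pvSplitC l = p :: ps →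
    PySem.Chars.splitOn.go ['.'] fuel l cur accs = accs.reverse ++ (cur.reverse ++ p) :: ps := by
  induction fuel with
  | zero => intro l cur accs p ps h; omega
  | succ n ih =>
    intro l cur accs p ps h hsp
    cases l with
    | nil =>
      simp [pvSplitC] at hsp
      simp [PySem.Chars.splitOn.go, ← hsp.1, ← hsp.2]
    | cons c rest =>
      by_cases hc : c = '.'
      · subst hc
        simp only [pvSplitC, if_pos] at hsp
        obtain ⟨hp, hps⟩ := List.cons.injEq .. ▸ hsp
        cases hq : pvSplitC rest with
        | nil => exact absurd hq (pvSplitC_ne_nil rest)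
        | cons q qs =>
          rw [PySem.Chars.splitOn.go]
          have hpre : List.isPrefixOf ['.'] ('.' :: rest) = true := by
            simp [List.isPrefixOf]
          rw [if_pos hpre]
          simp only [List.length_cons, List.length_nil, List.drop_succ_cons, List.drop_zero]
          rw [ih rest [] (cur.reverse :: accs) q qs (by simp at h; omega) hq]
          simp [← hp, ← hps, hq]
      · have hq := pvSplitC_ne_nil rest
        cases hq' : pvSplitC rest with
        | nil => exact absurd hq' hq
        | cons q qs =>
          simp only [pvSplitC, if_neg hc, hq'] at hsp
          obtain ⟨hp, hps⟩ := List.cons.injEq .. ▸ hsp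
          rw [PySem.Chars.splitOn.go]
          have hpre : List.isPrefixOf ['.'] (c :: rest) = false := by
            simp [List.isPrefixOf]
            intro hcc; exact absurd hcc.symm hc
          rw [if_neg (by simp [hpre])]
          rw [ih rest (c :: cur) accs q qs (by simp at h; omega) hq']
          simp [← hp, ← hps]

lemma pvSplitOn_eq (l : List Char) : PySem.Chars.splitOn l ['.'] = pvSplitC l := by
  cases hq : pvSplitC l with
  | nil => exact absurd hq (pvSplitC_ne_nil l)
  | cons q qs =>
    unfold PySem.Chars.splitOn
    rw [pvGo_eq (l.length + 1) l [] [] q qs (by omega) hq]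
    simp

lemma pvSplitC_dotfree (l : List Char) : ∀ p ∈ pvSplitC l, '.' ∉ p := by
  induction l with
  | nil => simp [pvSplitC]
  | cons c rest ih =>
    simp only [pvSplitC]
    by_cases hc : c = '.'
    · simp only [if_pos hc]
      intro p hp
      rcases hp with _ | hp
      · simp
      · exact ih p (by assumption)
    · rw [if_neg hc]
      cases hq : pvSplitC rest with
      | nil => exact absurd hq (pvSplitC_ne_nil rest)
      | cons q qs =>
        intro p hp
        rcases hp with _ | hp
        · have := ih q (by rw [hq]; exact List.mem_cons_self ..)
          simp only [List.mem_cons]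
          rintro (h1 | h2)
          · exact hc h1.symm
          · exact this h2
        · exact ih p (by rw [hq]; exact List.mem_cons_of_mem _ (by assumption))

lemma pvJoin_splitC (l : List Char) : PySem.Chars.join ['.'] (pvSplitC l) = l := by
  induction l with
  | nil => simp [pvSplitC, PySem.Chars.join, List.intercalate]
  | cons c rest ih =>
    simp only [pvSplitC]
    by_cases hc : c = '.'
    · rw [if_pos hc]
      cases hq : pvSplitC rest with
      | nil => exact absurd hq (pvSplitC_ne_nil rest)
      | cons q qs =>
        rw [hq] at ih
        rw [PySem.Chars.join_cons_cons]
        simp [PySem.Chars.join] at ih ⊢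
        simp [ih, hc]
    · rw [if_neg hc]
      cases hq : pvSplitC rest with
      | nil => exact absurd hq (pvSplitC_ne_nil rest)
      | cons q qs =>
        rw [hq] at ih
        cases qs with
        | nil =>
          simp [PySem.Chars.join, List.intercalate] at ih ⊢
          simp [ih]
        | cons r rs =>
          rw [PySem.Chars.join_cons_cons] at ih ⊢
          simp only [List.cons_append, ih]

lemma pvSplitC_of_dotfree (p : List Char) (h : '.' ∉ p) : pvSplitC p = [p] := by
  induction p with
  | nil => rfl
  | cons c rest ih =>
    simp only [List.mem_cons, not_or] at h
    simp only [pvSplitC, if_neg (fun hc => h.1 (Eq.symm hc)), ih h.2]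

lemma pvSplitC_prefix (p t : List Char) (h : '.' ∉ p) : pvSplitC (p ++ '.' :: t) = p :: pvSplitC t := by
  induction p with
  | nil => simp [pvSplitC]
  | cons c rest ih =>
    simp only [List.mem_cons, not_or] at h
    simp only [List.cons_append, pvSplitC, if_neg (fun hc => h.1 (Eq.symm hc)), ih h.2]

lemma pvSplitC_join (l : List (List Char)) (h0 : l ≠ []) (h : ∀ p ∈ l, '.' ∉ p) :
    pvSplitC (PySem.Chars.join ['.'] l) = l := by
  induction l with
  | nil => exact absurd rfl h0
  | cons p rest ih =>
    cases rest with
    | nil =>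
      have : PySem.Chars.join ['.'] [p] = p := by
        simp [PySem.Chars.join, List.intercalate, List.intersperse]
      rw [this]
      exact pvSplitC_of_dotfree p (h p (by simp))
    | cons q qs =>
      rw [PySem.Chars.join_cons_cons]
      rw [List.append_assoc,
        show (['.'] : List Char) ++ PySem.Chars.join ['.'] (q :: qs) = '.' :: PySem.Chars.join ['.'] (q :: qs) from rfl]
      rw [pvSplitC_prefix _ _ (h p (by simp))]
      rw [ih (by simp) (fun r hr => h r (List.mem_cons_of_mem _ hr))]

-- String-level bridges
lemma pvSplitA_eq (s : String) : pvSplitDotA s = (pvSplitC s.toList).map String.ofList := by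
  unfold pvSplitDotA PySem.Str.split?
  rw [show (".".toList : List Char) = ['.'] from rfl]
  simp [PySem.Chars.split?, pvSplitOn_eq]

lemma pvSplitA_ne_nil (s : String) : pvSplitDotA s ≠ [] := by
  rw [pvSplitA_eq]
  simp [pvSplitC_ne_nil]

lemma pvJoin_splitA (s : String) : PySem.Str.join "." (pvSplitDotA s) = s := by
  rw [pvSplitA_eq]
  unfold PySem.Str.join
  rw [show (".".toList : List Char) = ['.'] from rfl]
  rw [List.map_map]
  have : (String.toList ∘ String.ofList) = id := by funext l; simp
  rw [this, List.map_id, pvJoin_splitC]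
  simp

lemma pvSplitA_dotfree (s : String) : ∀ p ∈ pvSplitDotA s, '.' ∉ p.toList := by
  rw [pvSplitA_eq]
  intro p hp
  simp only [List.mem_map] at hp
  obtain ⟨q, hq, rfl⟩ := hp
  have := pvSplitC_dotfree s.toList q hq
  simpa using this

lemma pvSplitA_join (l : List String) (h0 : l ≠ []) (h : ∀ p ∈ l, '.' ∉ p.toList) :
    pvSplitDotA (PySem.Str.join "." l) = l := by
  rw [pvSplitA_eq]
  unfold PySem.Str.join
  rw [show (".".toList : List Char) = ['.'] from rfl]
  rw [show (String.ofList (PySem.Chars.join ['.'] (l.map String.toList))).toList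
        = PySem.Chars.join ['.'] (l.map String.toList) by simp]
  rw [pvSplitC_join (l.map String.toList) (by simpa using h0)
      (by intro p hp; simp only [List.mem_map] at hp; obtain ⟨q, hq, rfl⟩ := hp; exact h q hq)]
  rw [List.map_map]
  have : (String.ofList ∘ String.toList) = id := by funext t; simp
  rw [this, List.map_id]

def pvChain (q : List String) : List String :=
  if q.length ≤ 2 then [PySem.Str.join "." q]
  else PySem.Str.join "." q :: pvChain q.dropLast
termination_by q.length
decreasing_by simp [List.length_dropLast]; omega

def pvChainOf (s : String) : List String := pvChain (pvSplitDotA s)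

def pvDedup (acc cs : List String) : List String :=
  cs.foldl (fun r c => if c ∈ r then r else r ++ [c]) acc

lemma pvDedup_cons (acc : List String) (c : String) (cs : List String) :
    pvDedup acc (c :: cs) = pvDedup (if c ∈ acc then acc else acc ++ [c]) cs := rfl

lemma pvDedup_append (acc xs ys : List String) :
    pvDedup acc (xs ++ ys) = pvDedup (pvDedup acc xs) ys := by
  unfold pvDedup; rw [List.foldl_append]

lemma pvDedup_mem (cs : List String) : ∀ (acc : List String) (x : String),
    x ∈ pvDedup acc cs ↔ x ∈ acc ∨ x ∈ cs := by
  induction cs with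
  | nil => simp [pvDedup]
  | cons c cs ih =>
    intro acc x
    rw [pvDedup_cons, ih]
    by_cases hc : c ∈ acc
    · rw [if_pos hc]
      constructor
      · rintro (h | h)
        · exact Or.inl h
        · exact Or.inr (List.mem_cons_of_mem _ h)
      · rintro (h | h)
        · exact Or.inl h
        · rcases List.mem_cons.mp h with rfl | h
          · exact Or.inl hc
          · exact Or.inr h
    · rw [if_neg hc]
      simp only [List.mem_append, List.mem_cons]
      tauto

lemma pvDedup_eq_self (cs : List String) : ∀ (acc : List String), (∀ c ∈ cs, c ∈ acc) → pvDedup acc cs = acc := by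
  induction cs with
  | nil => intro acc _; rfl
  | cons c cs ih =>
    intro acc h
    rw [pvDedup_cons, if_pos (h c (by simp))]
    exact ih acc (fun d hd => h d (List.mem_cons_of_mem _ hd))

lemma pvInnerA_mem (n : Nat) (s : String) (acc : List String) (h : s ∈ acc) :
    pvInnerA n s acc = acc := by
  induction n with
  | zero => rfl
  | succ n ih => rw [pvInnerA, if_pos h, ih]

lemma pvJoinC_snoc (l : List (List Char)) (p : List Char) (h : l ≠ []) :
    PySem.Chars.join ['.'] (l ++ [p]) = PySem.Chars.join ['.'] l ++ '.' :: p := by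
  induction l with
  | nil => exact absurd rfl h
  | cons q qs ih =>
    cases qs with
    | nil =>
      simp [PySem.Chars.join, List.intercalate, List.intersperse]
    | cons r rs =>
      rw [show ((q :: r :: rs) ++ [p]) = q :: ((r :: rs) ++ [p]) from rfl]
      rw [show ((r :: rs) ++ [p]) = r :: (rs ++ [p]) from rfl]
      rw [PySem.Chars.join_cons_cons, PySem.Chars.join_cons_cons]
      rw [show (r :: (rs ++ [p])) = (r :: rs) ++ [p] from rfl]
      rw [ih (by simp)]
      simp

lemma pvJoin_snoc (l : List String) (p : String) (h : l ≠ []) :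
    (PySem.Str.join "." (l ++ [p])).toList = (PySem.Str.join "." l).toList ++ '.' :: p.toList := by
  unfold PySem.Str.join
  rw [show (".".toList : List Char) = ['.'] from rfl]
  simp only [List.map_append, List.map_cons, List.map_nil]
  rw [show ((l.map String.toList) ++ [p.toList]) = (l.map String.toList) ++ [p.toList] from rfl]
  rw [show (String.ofList (PySem.Chars.join ['.'] (l.map String.toList ++ [p.toList]))).toList = PySem.Chars.join ['.'] (l.map String.toList ++ [p.toList]) by simp]
  rw [pvJoinC_snoc _ _ (by simpa using h)]
  simp

lemma pvChain_base (q : List String) (h : q.length ≤ 2) : pvChain q = [PySem.Str.join "." q] := by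
  rw [pvChain, if_pos h]

lemma pvChain_step (q : List String) (h : ¬ q.length ≤ 2) :
    pvChain q = PySem.Str.join "." q :: pvChain q.dropLast := by
  rw [pvChain, if_neg h]

lemma pvJoin_len_lt (l : List String) (p : String) (h : l ≠ []) :
    (PySem.Str.join "." l).toList.length < (PySem.Str.join "." (l ++ [p])).toList.length := by
  rw [pvJoin_snoc l p h]
  simp

lemma pvChain_len_le (q : List String) : ∀ t ∈ pvChain q,
    t.toList.length ≤ (PySem.Str.join "." q).toList.length := by
  induction q using pvChain.induct with
  | case1 q h =>
    rw [pvChain_base q h]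
    intro t ht
    simp only [List.mem_singleton] at ht
    subst ht; rfl
  | case2 q h ih =>
    rw [pvChain_step q h]
    intro t ht
    rcases List.mem_cons.mp ht with rfl | ht
    · rfl
    · have h1 := ih t ht
      have h2 : q.dropLast ≠ [] := by
        have : q.dropLast.length = q.length - 1 := (List.length_dropLast (xs := q))
        intro hq; rw [hq] at this; simp at this; omega
      have h3 : q = q.dropLast ++ [q.getLast (by intro hq; rw [hq] at h; simp at h)] :=
        (List.dropLast_append_getLast _).symm
      refine le_of_lt ?_
      calc t.toList.length ≤ (PySem.Str.join "." q.dropLast).toList.length := h1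
        _ < (PySem.Str.join "." (q.dropLast ++ [q.getLast _])).toList.length := pvJoin_len_lt _ _ h2
        _ = (PySem.Str.join "." q).toList.length := by rw [← h3]

lemma pvChain_not_mem (q : List String) (p : String) (h : q ≠ []) :
    PySem.Str.join "." (q ++ [p]) ∉ pvChain q := by
  intro hmem
  have h1 := pvChain_len_le q _ hmem
  have h2 := pvJoin_len_lt q p h
  omega

lemma pvChainOf_join (q : List String) (h0 : q ≠ []) (h : ∀ p ∈ q, '.' ∉ p.toList) :
    pvChainOf (PySem.Str.join "." q) = pvChain q := by
  unfold pvChainOf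
  rw [pvSplitA_join q h0 h]

lemma pvChainOf_subset (q : List String) (h0 : q ≠ []) (h : ∀ p ∈ q, '.' ∉ p.toList) :
    ∀ t ∈ pvChain q, ∀ u ∈ pvChainOf t, u ∈ pvChain q := by
  induction q using pvChain.induct with
  | case1 q hq =>
    intro t ht u hu
    rw [pvChain_base q hq] at ht ⊢
    simp only [List.mem_singleton] at ht
    subst ht
    rw [pvChainOf_join q h0 h, pvChain_base q hq] at hu
    exact hu
  | case2 q hq ih =>
    intro t ht u hu
    rw [pvChain_step q hq] at ht ⊢
    rcases List.mem_cons.mp ht with rfl | ht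
    · rw [pvChainOf_join q h0 h, pvChain_step q hq] at hu
      exact hu
    · have hd0 : q.dropLast ≠ [] := by
        have : q.dropLast.length = q.length - 1 := List.length_dropLast (xs := q)
        intro hqq; rw [hqq] at this; simp at this; omega
      have hdf : ∀ p ∈ q.dropLast, '.' ∉ p.toList :=
        fun p hp => h p (List.dropLast_subset _ hp)
      exact List.mem_cons_of_mem _ (ih hd0 hdf t ht u hu)

lemma pvInner_eq : ∀ (partes : List String) (s : String) (acc : List String),
    pvSplitDotA s = partes →
    (∀ x ∈ acc, (∀ t ∈ pvChainOf x, t ∈ acc) ∨ (pvChain partes ⊆ pvChainOf x ∧ x ∉ pvChain partes)) →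
    pvInnerA partes.length s acc = pvDedup acc (pvChain partes) := by
  intro partes
  induction partes using pvChain.induct with
  | case1 partes hlen =>
    intro s acc hsp hinv
    have hne : partes ≠ [] := hsp ▸ pvSplitA_ne_nil s
    have hjoin : PySem.Str.join "." partes = s := by rw [← hsp, pvJoin_splitA]
    rw [pvChain_base partes hlen, hjoin]
    rw [pvDedup_cons]
    by_cases hmem : s ∈ acc
    · rw [if_pos hmem, pvInnerA_mem _ _ _ hmem]; rfl
    · rw [if_neg hmem]
      have h12 : partes.length = 1 ∨ partes.length = 2 := by
        cases partes with
        | nil => exact absurd rfl hne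
        | cons a t => simp only [List.length_cons] at hlen ⊢; omega
      rcases h12 with h1 | h2
      · rw [h1, pvInnerA, if_neg hmem]
        have : ((pvSplitDotA s).dropLast).length = 0 := by
          rw [hsp, List.length_dropLast, h1]
        simp only [this]
        norm_num
        rfl
      · rw [h2, pvInnerA, if_neg hmem]
        have : ((pvSplitDotA s).dropLast).length = 1 := by
          rw [hsp, List.length_dropLast, h2]
        simp only [this]
        rfl
  | case2 partes hlen ih =>
    intro s acc hsp hinv
    have hne : partes ≠ [] := hsp ▸ pvSplitA_ne_nil s
    have hjoin : PySem.Str.join "." partes = s := by rw [← hsp, pvJoin_splitA]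
    have hd0 : partes.dropLast ≠ [] := by
      have : partes.dropLast.length = partes.length - 1 := List.length_dropLast (xs := partes)
      intro hqq; rw [hqq] at this; simp at this; omega
    have hdf : ∀ p ∈ partes.dropLast, '.' ∉ p.toList := by
      intro p hp
      exact (hsp ▸ pvSplitA_dotfree s) p (List.dropLast_subset _ hp)
    have hchain : pvChain partes = s :: pvChain partes.dropLast := by
      rw [pvChain_step partes hlen, hjoin]
    have hlast : partes.dropLast ++ [partes.getLast hne] = partes := List.dropLast_append_getLast hne
    have hnotmem : s ∉ pvChain partes.dropLast := by
      have h2 := pvChain_not_mem partes.dropLast (partes.getLast hne) hd0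
      rw [hlast, hjoin] at h2
      exact h2
    rw [hchain, pvDedup_cons]
    by_cases hmem : s ∈ acc
    · rw [if_pos hmem, pvInnerA_mem _ _ _ hmem]
      rcases hinv s hmem with hD1 | hD2
      · refine (pvDedup_eq_self _ acc ?_).symm
        intro c hc
        refine hD1 c ?_
        unfold pvChainOf
        rw [hsp, hchain]
        exact List.mem_cons_of_mem _ hc
      · exact absurd (hchain ▸ List.mem_cons_self ..) hD2.2
    · rw [if_neg hmem]
      have hlen3 : 3 ≤ partes.length := by omega
      obtain ⟨m, hm⟩ : ∃ m, partes.length = m + 3 := ⟨partes.length - 3, by omega⟩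
      rw [hm, pvInnerA, if_neg hmem]
      have hdl : (pvSplitDotA s).dropLast = partes.dropLast := by rw [hsp]
      simp only [hdl]
      rw [if_neg (by rw [List.length_dropLast, hm]; omega)]
      have hsp' : pvSplitDotA (PySem.Str.join "." partes.dropLast) = partes.dropLast :=
        pvSplitA_join _ hd0 hdf
      have hfuel : partes.dropLast.length = m + 2 := by
        rw [List.length_dropLast, hm]
        omega
      rw [← hfuel]
      rw [ih _ _ hsp' ?_]
      · intro x hx
        rcases List.mem_append.mp hx with hx | hx
        · rcases hinv x hx with hD1 | hD2
          · exact Or.inl (fun t ht => List.mem_append_left _ (hD1 t ht))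
          · refine Or.inr ⟨fun t ht => hD2.1 (hchain ▸ List.mem_cons_of_mem _ ht), fun ht => hD2.2 (hchain ▸ List.mem_cons_of_mem _ ht)⟩
        · simp only [List.mem_singleton] at hx
          subst hx
          refine Or.inr ⟨?_, hnotmem⟩
          have : pvChainOf x = pvChain partes := by unfold pvChainOf; rw [hsp]
          rw [this, hchain]
          exact fun t ht => List.mem_cons_of_mem _ ht

def pvClosed (acc : List String) : Prop := ∀ x ∈ acc, ∀ t ∈ pvChainOf x, t ∈ acc

lemma pvInner_toplevel (classe : String) (acc : List String) (h : pvClosed acc) :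
    pvInnerA (pvSplitDotA classe).length classe acc = pvDedup acc (pvChainOf classe) := by
  unfold pvChainOf
  exact pvInner_eq (pvSplitDotA classe) classe acc rfl
    (fun x hx => Or.inl (h x hx))

lemma pvClosed_step (classe : String) (acc : List String) (h : pvClosed acc) :
    pvClosed (pvDedup acc (pvChainOf classe)) := by
  intro x hx t ht
  rcases (pvDedup_mem _ _ _).mp hx with hx | hx
  · exact (pvDedup_mem _ _ _).mpr (Or.inl (h x hx t ht))
  · have := pvChainOf_subset (pvSplitDotA classe) (pvSplitA_ne_nil classe)
      (pvSplitA_dotfree classe) x hx t ht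
    exact (pvDedup_mem _ _ _).mpr (Or.inr this)

lemma pvFoldA_eq (hs : List String) : ∀ (acc : List String), pvClosed acc →
    hs.foldl (fun acc classe => pvInnerA (pvSplitDotA classe).length classe acc) acc
      = pvDedup acc (hs.flatMap pvChainOf) := by
  induction hs with
  | nil => intro acc _; rfl
  | cons c cs ih =>
    intro acc h
    rw [List.foldl_cons, List.flatMap_cons, pvDedup_append]
    rw [pvInner_toplevel c acc h]
    exact ih _ (pvClosed_step c acc h)

lemma pvPyRange_down_cons (m : Nat) :
    PySem.List.pyRange ((m : Int) + 3) 1 (-1) = ((m : Int) + 3) :: PySem.List.pyRange ((m : Int) + 2) 1 (-1) := by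
  unfold PySem.List.pyRange
  norm_num
  rw [if_pos (by omega), if_pos (by omega)]
  have h2 : ((m : Int) + 3).toNat - 1 = m + 2 := by omega
  have h3 : ((m : Int) + 2).toNat - 1 = m + 1 := by omega
  rw [h2, h3]
  rw [List.range_succ_eq_map]
  simp only [List.map_cons, List.map_map]
  refine List.cons_eq_cons.mpr ⟨by push_cast; ring, ?_⟩
  apply List.map_congr_left
  intro k _
  simp only [Function.comp]
  push_cast
  ring

lemma pvPyRange_mem_bound (m : Nat) (i : Int) (h : i ∈ PySem.List.pyRange ((m : Int) + 2) 1 (-1)) :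
    0 ≤ i ∧ i.toNat ≤ m + 2 := by
  unfold PySem.List.pyRange at h
  norm_num at h
  rw [if_pos (by omega)] at h
  obtain ⟨k, hk, rfl⟩ := h
  constructor <;> omega

lemma pvChain_closed_form (m : Nat) : ∀ (q : List String), q.length = m + 2 →
    pvChain q = (PySem.List.pyRange (q.length : Int) 1 (-1)).map
        (fun i => PySem.Str.join "." (PySem.List.slice q none (some i))) := by
  induction m with
  | zero =>
    intro q hq
    have hq2 : q.length = 2 := by omega
    rw [pvChain_base q (by omega), hq2]
    rw [show PySem.List.pyRange ((2 : Nat) : Int) 1 (-1) = [2] from by decide]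
    simp only [List.map_cons, List.map_nil]
    rw [PySem.List.slice_to _ (by norm_num)]
    rw [show ((2 : Int)).toNat = 2 from rfl, ← hq2, List.take_length]
  | succ m ih =>
    intro q hq
    rw [pvChain_step q (by omega)]
    have hcast : ((q.length : Nat) : Int) = (m : Int) + 3 := by rw [hq]; push_cast; ring
    rw [hcast, pvPyRange_down_cons m]
    rw [List.map_cons]
    have hdl : q.dropLast.length = m + 2 := by rw [List.length_dropLast, hq]; omega
    rw [ih q.dropLast hdl]
    have hc2 : ((q.dropLast.length : Nat) : Int) = (m : Int) + 2 := by rw [hdl]; push_cast; ring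
    rw [hc2]
    refine List.cons_eq_cons.mpr ⟨?_, ?_⟩
    · rw [PySem.List.slice_to _ (by omega)]
      rw [show ((m : Int) + 3).toNat = q.length from by omega]
      rw [List.take_length]
    · apply List.map_congr_left
      intro i hi
      obtain ⟨h0, hle⟩ := pvPyRange_mem_bound m i hi
      rw [PySem.List.slice_to _ h0, PySem.List.slice_to _ h0]
      rw [List.dropLast_eq_take, List.take_take]
      rw [Nat.min_eq_left (by omega)]

lemma pvCand_eq (classe : String) : pvCandidatosB classe = pvChainOf classe := by
  unfold pvCandidatosB pvChainOf
  have hps : ((PySem.Str.split? classe ".").getD [] : List String) = pvSplitDotA classe := rfl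
  rw [hps]
  by_cases h1 : (pvSplitDotA classe).length = 1
  · rw [if_pos h1, pvChain_base _ (by omega), pvJoin_splitA]
  · rw [if_neg h1]
    have hne := pvSplitA_ne_nil classe
    have hlen : 2 ≤ (pvSplitDotA classe).length := by
      cases hq : pvSplitDotA classe with
      | nil => exact absurd hq hne
      | cons a t =>
        rw [hq] at h1
        simp only [List.length_cons] at h1 ⊢
        omega
    exact (pvChain_closed_form ((pvSplitDotA classe).length - 2) _ (by omega)).symm

lemma pvPairFold_eq (cs : List String) : ∀ (res : List String) (vst : PySem.Set String),
    (∀ x, x ∈ vst ↔ x ∈ res) →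
    (cs.foldl (fun (st : List String × PySem.Set String) c =>
        if st.2.contains c then st else (st.1 ++ [c], st.2.add c)) (res, vst)).1
      = pvDedup res cs := by
  induction cs with
  | nil => intro res vst _; rfl
  | cons c cs ih =>
    intro res vst hinv
    rw [List.foldl_cons, pvDedup_cons]
    by_cases hc : c ∈ res
    · have hcc : (res, vst).2.contains c = true :=
        (List.contains_iff_mem).mpr ((hinv c).mpr hc)
      rw [if_pos hcc, if_pos hc]
      exact ih res vst hinv
    · have hcc : ¬ ((res, vst).2.contains c = true) := by
        intro h
        exact hc ((hinv c).mp ((List.contains_iff_mem).mp h))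
      rw [if_neg hcc, if_neg hc]
      refine ih _ _ ?_
      intro x
      rw [PySem.Set.mem_add]
      simp only [List.mem_append, List.mem_singleton]
      rw [hinv x]

-- ===== VERDICT (by name: the statement is the Claim_ definition above) =====
theorem gera_hierarquia_completa_spec : Claim_equal_gera_hierarquia_completa := by
  intro hierarquia _
  unfold Spec_gera_hierarquia_completa
  unfold gera_hierarquia_completa gera_hierarquia_completa_alt
  rw [pvFoldA_eq hierarquia [] (by intro x hx; simp at hx)]
  rw [PySem.List.foldl_append_eq_flatMap]
  rw [pvPairFold_eq _ [] _ (by intro x; rw [PySem.Set.mem_ofList])]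
  rw [List.nil_append]
  have : pvCandidatosB = pvChainOf := funext pvCand_eq
  rw [this]
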